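-- pv_equiv track=rewrite | github.com/AdrianSuliga/WDI | Tests/ex_2_20-21.py | searchArray
-- ===== SOURCE A (Python) =====
-- def searchArray(T): # funkcja porównuje każdy wierszy z każdym o numerze większym od niego
--     n = len(T) #
--     maxDist, cDist = -float('inf'), 0
--     res = (-1, -1)
--     for i in range(n):
--         for j in range(i + 1, n): # zaczynamy od i + 1, bo wiersze wsześniej już zdążyliśmy porównać w poprzednich iteracjach
--             if i == j: continue # takich samy wierszy nie ma co sprawdzać
--             cDist = calcDist(T, i, j)
--             if cDist > maxDist:
--                 res = (i,j)
--                 maxDist = cDist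
--     return res
--
-- def calcDist(T, i, j):
--     dist = 0
--     n = len(T)
--     for k in range(n):
--         if T[i][k] == T[j][k]: continue # jeśli dwie komórki są takie same to nie wpływają na odległość wierszy
--         if T[i][k] == 1:
--             dist += T[i][k] * 2**(n - k) # jeśli w i. wierszu jest 1 to dodajemy do odl
--             continue
--         if T[j][k] == 1:
--             dist -= T[j][k] * 2**(n - k) # jeśli w j. wierszu jest 1 to odejmujemy od odl
--             continue
--     return abs(dist) # zwracamy bez znaku aby bez problemów porównywać
-- ===== SOURCE B (Python) =====
-- def searchArray(T):
--     # precompute each row's weighted value once; the per-pair distance is |vals[i] - vals[j]|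
--     n = len(T)
--     if n < 2:
--         return (-1, -1)
--     vals = [sum(2 ** (n - k) for k in range(n) if row[k] == 1) for row in T]
--     best, res = None, (-1, -1)
--     for i in range(n):
--         for j in range(i + 1, n):
--             d = abs(vals[i] - vals[j])
--             if best is None or d > best:
--                 best, res = d, (i, j)
--     return res
-- ===== Notes on version B (the rewrite author's own statement) =====
-- stated objective: faster
-- what changed: Each row's weighted binary value is computed once up front, so the O(n) per-pair calcDist scan disappears: the pair distance becomes |vals[i]-vals[j]|, dropping O(n^3) to O(n^2).
import Mathlib
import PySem

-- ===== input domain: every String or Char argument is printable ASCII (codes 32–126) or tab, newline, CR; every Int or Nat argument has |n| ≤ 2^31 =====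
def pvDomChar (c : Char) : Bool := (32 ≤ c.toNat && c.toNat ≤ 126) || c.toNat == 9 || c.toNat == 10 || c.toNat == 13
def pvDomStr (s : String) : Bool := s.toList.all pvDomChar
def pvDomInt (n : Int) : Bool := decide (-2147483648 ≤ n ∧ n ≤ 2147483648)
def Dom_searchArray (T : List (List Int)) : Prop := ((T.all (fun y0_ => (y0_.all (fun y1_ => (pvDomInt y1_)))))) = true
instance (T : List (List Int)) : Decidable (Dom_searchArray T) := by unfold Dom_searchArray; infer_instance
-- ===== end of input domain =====

-- B precomputes each row's weighted value once, replacing A's O(n) per-pair scan by |vals[i]-vals[j]| (O(n^3) → O(n^2)).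

-- ===== PORT A =====
-- helper calcDist of Source A; row/cell indices are in range under Pre_, so pyGetD's defaults are never used there;
-- the exponent n - k is ≥ 1 for every k produced by range(n), so `.toNat` is exact
def calcDist (T : List (List Int)) (i j : Int) : Int :=
  let n : Int := T.length
  let dist := (PySem.List.pyRange 0 n 1).foldl (fun dist k =>
    let Tik := PySem.List.pyGetD (PySem.List.pyGetD T i []) k 0
    let Tjk := PySem.List.pyGetD (PySem.List.pyGetD T j []) k 0
    if Tik == Tjk then dist
    else if Tik == 1 then dist + Tik * 2 ^ (n - k).toNat
    else if Tjk == 1 then dist - Tjk * 2 ^ (n - k).toNat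
    else dist) 0
  |dist|

-- maxDist starts at -inf, modelled as `none`: any integer compares greater than it
def searchArray (T : List (List Int)) : Int × Int :=
  let n : Int := T.length
  let st := (PySem.List.pyRange 0 n 1).foldl (fun st i =>
    (PySem.List.pyRange (i + 1) n 1).foldl (fun st j =>
      if i == j then st
      else
        let cDist := calcDist T i j
        match st.1 with
        | none => (some cDist, (i, j))
        | some m => if cDist > m then (some cDist, (i, j)) else st) st)
    ((none : Option Int), ((-1 : Int), (-1 : Int)))
  st.2

-- ===== PORT B =====
def searchArray_alt (T : List (List Int)) : Int × Int :=
  let n : Int := T.length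
  if n < 2 then (-1, -1)
  else
    let vals := T.map (fun row =>
      (PySem.List.pyRange 0 n 1).foldl (fun acc k =>
        if PySem.List.pyGetD row k 0 == 1 then acc + 2 ^ (n - k).toNat else acc) 0)
    let st := (PySem.List.pyRange 0 n 1).foldl (fun st i =>
      (PySem.List.pyRange (i + 1) n 1).foldl (fun st j =>
        let d := |PySem.List.pyGetD vals i 0 - PySem.List.pyGetD vals j 0|
        match st.1 with
        | none => (some d, (i, j))
        | some b => if d > b then (some d, (i, j)) else st) st)
      ((none : Option Int), ((-1 : Int), (-1 : Int)))
    st.2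

-- ===== PRECONDITION & SPEC =====
-- Pre_ excludes exactly the inputs where the Pythons raise IndexError: with at least two rows,
-- every row must have at least len(T) cells (both A's calcDist and B's vals read row[k] for k < len(T))
def Pre_searchArray (T : List (List Int)) : Prop :=
  2 ≤ T.length → ∀ r ∈ T, T.length ≤ r.length

instance (T : List (List Int)) : Decidable (Pre_searchArray T) := by
  unfold Pre_searchArray; infer_instance

def pvWitness_searchArray : List (List Int) := [[1, 0], [0, 1]]

def Spec_searchArray (T : List (List Int)) (out : Int × Int) : Prop := out = searchArray_alt T
instance (T : List (List Int)) (out : Int × Int) : Decidable (Spec_searchArray T out) := by unfold Spec_searchArray; infer_instance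

-- ===== CLAIM (what is proved, stated in full; the proofs are below) =====
def Claim_equal_searchArray : Prop := ∀ (T : List (List Int)), Dom_searchArray T → Pre_searchArray T → Spec_searchArray T (searchArray T)

-- ===== LEMMAS AND PROOFS =====

def wgt (n : Int) (r : List Int) (k : Int) : Int :=
  if PySem.List.pyGetD r k 0 == 1 then 2 ^ (n - k).toNat else 0

lemma sum_map_sub (l : List Int) (f g : Int → Int) :
    (l.map fun k => f k - g k).sum = (l.map f).sum - (l.map g).sum := by
  induction l with
  | nil => simp
  | cons h t ih => simp only [List.map_cons, List.sum_cons, ih]; ring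

lemma valf_eq (r : List Int) (n : Int) :
    (PySem.List.pyRange 0 n 1).foldl (fun acc k =>
      if PySem.List.pyGetD r k 0 == 1 then acc + 2 ^ (n - k).toNat else acc) 0
    = ((PySem.List.pyRange 0 n 1).map (wgt n r)).sum := by
  rw [PySem.List.foldl_congr_mem _ _ (fun acc k => acc + wgt n r k) _ ?_]
  · rw [PySem.List.foldl_add]; ring
  · intro acc k _
    by_cases h : PySem.List.pyGetD r k 0 == 1 <;> simp [wgt, h]

lemma dist_core (r s : List Int) (n : Int) :
    (PySem.List.pyRange 0 n 1).foldl (fun dist k =>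
      if PySem.List.pyGetD r k 0 == PySem.List.pyGetD s k 0 then dist
      else if PySem.List.pyGetD r k 0 == 1 then dist + PySem.List.pyGetD r k 0 * 2 ^ (n - k).toNat
      else if PySem.List.pyGetD s k 0 == 1 then dist - PySem.List.pyGetD s k 0 * 2 ^ (n - k).toNat
      else dist) 0
    = ((PySem.List.pyRange 0 n 1).map (wgt n r)).sum
      - ((PySem.List.pyRange 0 n 1).map (wgt n s)).sum := by
  rw [PySem.List.foldl_congr_mem _ _ (fun dist k => dist + (wgt n r k - wgt n s k)) _ ?_]
  · rw [PySem.List.foldl_add, sum_map_sub]; ring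
  · intro acc k _
    by_cases h1 : PySem.List.pyGetD r k 0 == PySem.List.pyGetD s k 0
    · simp only [beq_iff_eq] at h1
      by_cases h2 : PySem.List.pyGetD r k 0 = 1 <;> simp [wgt, h1]
    · simp only [beq_iff_eq] at h1
      by_cases h2 : PySem.List.pyGetD r k 0 = 1
      · have h3 : ¬ PySem.List.pyGetD s k 0 = 1 := by rw [h2] at h1; omega
        simp [wgt, h2, h3, Ne.symm h3]
      · by_cases h3 : PySem.List.pyGetD s k 0 = 1 <;>
          simp [wgt, h2, h3]; ring

lemma calcDist_eq (T : List (List Int)) (i j : Int) :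
    calcDist T i j =
      |((PySem.List.pyRange 0 (T.length : Int) 1).map (wgt (T.length : Int) (PySem.List.pyGetD T i []))).sum
        - ((PySem.List.pyRange 0 (T.length : Int) 1).map (wgt (T.length : Int) (PySem.List.pyGetD T j []))).sum| := by
  simp only [calcDist]
  rw [dist_core]

lemma vals_get (T : List (List Int)) (i : Int) (h0 : 0 ≤ i) (h1 : i < (T.length : Int)) :
    PySem.List.pyGetD
      (T.map (fun row => (PySem.List.pyRange 0 (T.length : Int) 1).foldl (fun acc k =>
        if PySem.List.pyGetD row k 0 == 1 then acc + 2 ^ ((T.length : Int) - k).toNat else acc) 0)) i 0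
    = ((PySem.List.pyRange 0 (T.length : Int) 1).map (wgt (T.length : Int) (PySem.List.pyGetD T i []))).sum := by
  rw [PySem.List.pyGetD_eq_getElem _ _ h0 (by simpa using h1), List.getElem_map,
      PySem.List.pyGetD_eq_getElem _ _ h0 h1, valf_eq]

lemma fold_eq (T : List (List Int)) :
    ((PySem.List.pyRange 0 (T.length : Int) 1).foldl (fun st i =>
      (PySem.List.pyRange (i + 1) (T.length : Int) 1).foldl (fun st j =>
        if i == j then st
        else
          let cDist := calcDist T i j
          match st.1 with
          | none => (some cDist, (i, j))
          | some m => if cDist > m then (some cDist, (i, j)) else st) st)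
      ((none : Option Int), ((-1 : Int), (-1 : Int))))
    =
    ((PySem.List.pyRange 0 (T.length : Int) 1).foldl (fun st i =>
      (PySem.List.pyRange (i + 1) (T.length : Int) 1).foldl (fun st j =>
        let d := |PySem.List.pyGetD
            (T.map (fun row => (PySem.List.pyRange 0 (T.length : Int) 1).foldl (fun acc k =>
              if PySem.List.pyGetD row k 0 == 1 then acc + 2 ^ ((T.length : Int) - k).toNat else acc) 0)) i 0
          - PySem.List.pyGetD
            (T.map (fun row => (PySem.List.pyRange 0 (T.length : Int) 1).foldl (fun acc k =>
              if PySem.List.pyGetD row k 0 == 1 then acc + 2 ^ ((T.length : Int) - k).toNat else acc) 0)) j 0|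
        match st.1 with
        | none => (some d, (i, j))
        | some b => if d > b then (some d, (i, j)) else st) st)
      ((none : Option Int), ((-1 : Int), (-1 : Int)))) := by
  apply PySem.List.foldl_congr_mem
  intro st i hi
  apply PySem.List.foldl_congr_mem
  intro st' j hj
  rw [PySem.List.mem_pyRange_one] at hi hj
  have hij : (i == j) = false := by simp; omega
  rw [hij]
  simp only [Bool.false_eq_true, if_false]
  rw [calcDist_eq, vals_get T i (by omega) (by omega), vals_get T j (by omega) (by omega)]

lemma searchArray_eq_alt (T : List (List Int)) : searchArray T = searchArray_alt T := by
  by_cases h : (T.length : Int) < 2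
  · match T, h with
    | [], _ => rfl
    | [r], _ =>
      simp only [searchArray, searchArray_alt]
      norm_num [PySem.List.pyRange_one_eq_nil, PySem.List.pyRange_one_cons]
    | (a :: b :: t), h => simp at h; omega
  · simp only [searchArray, searchArray_alt, if_neg h]
    rw [fold_eq]

-- ===== VERDICT (by name: the statement is the Claim_ definition above) =====
theorem searchArray_spec : Claim_equal_searchArray := by
  intro T _ _
  unfold Spec_searchArray
  exact searchArray_eq_alt T
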